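-- pv_equiv track=rewrite | github.com/binhphamdz/EditVideo_Pro-Old | main.py | _make_unique_project_name
-- ===== SOURCE A (Python) =====
-- def _make_unique_project_name(project_name, existing_projects, source_profile):
--     existing_names = {
--         str((pdata or {}).get("name", "")).strip().casefold()
--         for pdata in existing_projects.values()
--     }
--     base_name = str(project_name or "Project").strip() or "Project"
--     candidate = base_name
--
--     if candidate.casefold() not in existing_names:
--         return candidate
--
--     counter = 1
--     while True:
--         suffix = f" (từ {source_profile})" if counter == 1 else f" (từ {source_profile} {counter})"
--         candidate = f"{base_name}{suffix}"
--         if candidate.casefold() not in existing_names: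
--             return candidate
--         counter += 1
-- ===== SOURCE B (Python) =====
-- def _make_unique_project_name(project_name, existing_projects, source_profile):
--     base_name = str(project_name or "Project").strip() or "Project"
--     base_cf = base_name.casefold()
--     sp_cf = source_profile.casefold()
--     exact1 = f"{base_cf} (từ {sp_cf})"
--     prefix = f"{base_cf} (từ {sp_cf} "
--     # Parse each existing name into the counter it occupies (instead of probing
--     # candidates): name == base -> 0, name == base + " (từ sp)" -> 1,
--     # name == prefix + canonical decimal v + ")" -> v (v >= 2).
--     used = set()
--     for pdata in existing_projects.values():
--         t = str((pdata or {}).get("name", "")).strip().casefold()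
--         if t == base_cf:
--             used.add(0)
--         elif t == exact1:
--             used.add(1)
--         elif t.startswith(prefix) and t.endswith(")"):
--             m = t[len(prefix):-1]
--             v = 0
--             ok = bool(m)
--             for ch in m:
--                 if "0" <= ch <= "9":
--                     v = v * 10 + ord(ch) - 48
--                 else:
--                     ok = False
--             if ok and v >= 2 and str(v) == m:
--                 used.add(v)
--     # the answer's counter is the smallest non-negative integer not in `used`
--     k = 0
--     for c in sorted(used):
--         if c != k:
--             break
--         k += 1
--     if k == 0:
--         return base_name
--     if k == 1:
--         return f"{base_name} (từ {source_profile})"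
--     return f"{base_name} (từ {source_profile} {k})"
-- ===== Notes on version B (the rewrite author's own statement) =====
-- stated objective: alternative
-- what changed: Instead of generating candidate names and probing each against the set of existing names, B parses every existing name once into the counter slot it occupies (0, 1, or a canonical decimal v>=2 in the suffix), sorts the occupied counters and takes their mex as the answer's counter.
import Mathlib
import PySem

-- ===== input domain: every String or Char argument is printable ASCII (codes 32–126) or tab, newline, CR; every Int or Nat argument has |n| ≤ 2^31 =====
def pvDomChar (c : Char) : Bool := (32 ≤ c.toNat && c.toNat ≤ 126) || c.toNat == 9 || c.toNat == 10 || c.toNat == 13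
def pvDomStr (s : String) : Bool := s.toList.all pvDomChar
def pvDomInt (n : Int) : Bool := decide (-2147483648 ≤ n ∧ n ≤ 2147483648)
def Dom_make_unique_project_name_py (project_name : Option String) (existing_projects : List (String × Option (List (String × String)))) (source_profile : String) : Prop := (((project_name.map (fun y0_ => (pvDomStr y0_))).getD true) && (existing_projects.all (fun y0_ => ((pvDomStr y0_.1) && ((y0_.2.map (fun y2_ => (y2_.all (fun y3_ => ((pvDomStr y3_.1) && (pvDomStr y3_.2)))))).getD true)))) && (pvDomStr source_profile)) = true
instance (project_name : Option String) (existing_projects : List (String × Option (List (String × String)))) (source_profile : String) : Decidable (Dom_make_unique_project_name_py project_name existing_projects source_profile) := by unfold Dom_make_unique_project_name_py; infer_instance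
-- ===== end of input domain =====

-- B replaces A's generate-and-probe loop by a single parse of every existing name
-- into the counter slot it occupies, followed by a sort-and-scan mex of those
-- counters (objective: alternative algorithm).
-- casefold is ported as PySem.Str.lower: exact here, since on the admitted ASCII
-- domain (plus the lowercase literal 'ừ' of the program) casefold = lower.

-- ===== PORT A =====
-- the normalized form str((pdata or {}).get("name","")).strip().casefold() (shared by both Pythons)
def pvNorm (p : String × Option (List (String × String))) : String :=
  PySem.Str.lower (PySem.Str.strip (PySem.Dict.getD (PySem.Dict.mk (p.2.getD [])) "name" ""))

-- the set comprehension of A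
def pvNames (existing_projects : List (String × Option (List (String × String)))) : PySem.Set String :=
  PySem.Set.ofList (existing_projects.map pvNorm)

-- str(project_name or "Project").strip() or "Project" (shared by both Pythons)
def pvBase (project_name : Option String) : String :=
  let s := match project_name with
    | none => "Project"
    | some s => if s = "" then "Project" else s
  let t := PySem.Str.strip s
  if t = "" then "Project" else t

-- A's while-loop; the fuel (length+1) provably suffices because the casefolded
-- suffixed candidates for counters 1..len+1 are pairwise distinct, so the fuel-0
-- branch is unreachable on real inputs
def pvLoopA (names : PySem.Set String) (base source_profile : String) : Int → Nat → String
  | _, 0 => ""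
  | counter, fuel+1 =>
    let suffix := if counter == 1
      then " (từ " ++ source_profile ++ ")"
      else " (từ " ++ source_profile ++ " " ++ PySem.Int.toStr counter ++ ")"
    let candidate := base ++ suffix
    if PySem.Set.contains names (PySem.Str.lower candidate)
    then pvLoopA names base source_profile (counter + 1) fuel
    else candidate

def make_unique_project_name_py (project_name : Option String) (existing_projects : List (String × Option (List (String × String)))) (source_profile : String) : String :=
  let existing_names := pvNames existing_projects
  let base_name := pvBase project_name
  let candidate := base_name
  if ¬ PySem.Set.contains existing_names (PySem.Str.lower candidate)
  then candidate
  else pvLoopA existing_names base_name source_profile 1 (existing_projects.length + 1)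

-- ===== PORT B =====
-- the candidate name carrying counter i (the three return branches of Source B)
def pvCandB (base source_profile : String) (i : Int) : String :=
  if i == 0 then base
  else if i == 1 then base ++ " (từ " ++ source_profile ++ ")"
  else base ++ " (từ " ++ source_profile ++ " " ++ PySem.Int.toStr i ++ ")"

-- Source B's inner digit loop: v = 0; ok = bool(m); for ch in m: digit -> v = v*10+…, else ok = False
def pvDigitsVal (m : List Char) : Int × Bool :=
  m.foldl (fun (acc : Int × Bool) ch =>
    if '0' ≤ ch ∧ ch ≤ '9' then (acc.1 * 10 + (ch.toNat : Int) - 48, acc.2) else (acc.1, false))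
    (0, !m.isEmpty)

-- Source B's per-name classification: which counter slot does normalized name t occupy?
def pvParse (bcf scf : String) (t : String) : Option Int :=
  let exact1 := bcf ++ " (từ " ++ scf ++ ")"
  let pre := bcf ++ " (từ " ++ scf ++ " "
  if t = bcf then some 0
  else if t = exact1 then some 1
  else if PySem.Str.startswith t pre ∧ PySem.Str.endswith t ")" then
    let m := PySem.Str.slice t (some (PySem.Str.len pre)) (some (-1))
    let r := pvDigitsVal m.toList
    if r.2 ∧ 2 ≤ r.1 ∧ PySem.Int.toStr r.1 = m then some r.1 else none
  else none

-- Source B's loop building `used`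
def pvUsed (bcf scf : String) (existing_projects : List (String × Option (List (String × String)))) : PySem.Set Int :=
  existing_projects.foldl (fun s pr =>
    match pvParse bcf scf (pvNorm pr) with
    | some i => PySem.Set.add s i
    | none => s) []

-- Source B's mex scan: k = 0; for c in sorted(used): if c != k: break; k += 1
def pvMexScan : List Int → Int → Int
  | [], k => k
  | c :: rest, k => if c ≠ k then k else pvMexScan rest (k + 1)

def make_unique_project_name_py_alt (project_name : Option String) (existing_projects : List (String × Option (List (String × String)))) (source_profile : String) : String :=
  let base_name := pvBase project_name
  let bcf := PySem.Str.lower base_name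
  let scf := PySem.Str.lower source_profile
  let used := pvUsed bcf scf existing_projects
  let k := pvMexScan (PySem.List.sorted used (fun x => x) false) 0
  pvCandB base_name source_profile k

-- ===== PRECONDITION & SPEC =====
def Spec_make_unique_project_name_py (project_name : Option String) (existing_projects : List (String × Option (List (String × String)))) (source_profile : String) (out : String) : Prop := out = make_unique_project_name_py_alt project_name existing_projects source_profile
instance (project_name : Option String) (existing_projects : List (String × Option (List (String × String)))) (source_profile : String) (out : String) : Decidable (Spec_make_unique_project_name_py project_name existing_projects source_profile out) := by unfold Spec_make_unique_project_name_py; infer_instance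

-- ===== CLAIM (what is proved, stated in full; the proofs are below) =====
def Claim_equal_make_unique_project_name_py : Prop := ∀ (project_name : Option String) (existing_projects : List (String × Option (List (String × String)))) (source_profile : String), Dom_make_unique_project_name_py project_name existing_projects source_profile → Spec_make_unique_project_name_py project_name existing_projects source_profile (make_unique_project_name_py project_name existing_projects source_profile)

-- ===== LEMMAS AND PROOFS =====

-- whether candidate i's casefolded form is absent from the normalized name set
def pvFree (names : PySem.Set String) (base sp : String) (i : Int) : Bool :=
  ¬ PySem.Set.contains names (PySem.Str.lower (pvCandB base sp i))

-- A's loop from counter k ≥ 1 with fuel f scans exactly the candidates of the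
-- int range [k, k+f), returning the first free one (or "" on exhaustion).
theorem pvLoopA_eq_find (names : PySem.Set String) (base sp : String) :
    ∀ (f : Nat) (k : Int), 1 ≤ k →
    pvLoopA names base sp k f =
      (match (PySem.List.pyRange k (k + f) 1).find? (pvFree names base sp) with
       | some i => pvCandB base sp i
       | none => "") := by
  intro f
  induction f with
  | zero =>
    intro k hk
    simp [pvLoopA, PySem.List.pyRange]
  | succ f ih =>
    intro k hk
    have hlt : k < k + (f + 1 : Nat) := by push_cast; omega
    have hcand : pvCandB base sp k =
        base ++ (if k == 1 then " (từ " ++ sp ++ ")"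
                 else " (từ " ++ sp ++ " " ++ PySem.Int.toStr k ++ ")") := by
      have hk0 : (k == 0) = false := by simp; omega
      unfold pvCandB
      rw [hk0]
      simp only [Bool.false_eq_true, if_false]
      split <;> simp [String.append_assoc]
    rw [PySem.List.pyRange_one_cons hlt, List.find?_cons, pvLoopA]
    simp only [← hcand]
    by_cases hc : PySem.Str.lower (pvCandB base sp k) ∈ names
    · have hp : pvFree names base sp k = false := by simp [pvFree, PySem.Set.contains, hc]
      rw [hp, if_pos (by simp [PySem.Set.contains, hc]), ih (k + 1) (by omega)]
      have h2 : k + 1 + (f : Int) = k + ((f + 1 : Nat) : Int) := by push_cast; omega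
      rw [h2]
    · have hp : pvFree names base sp k = true := by simp [pvFree, PySem.Set.contains, hc]
      rw [hp, if_neg (by simp [PySem.Set.contains, hc])]

-- A is the first free candidate of the range [0, n+2)
theorem pvA_eq_find (pn : Option String) (ep : List (String × Option (List (String × String)))) (sp : String) :
    make_unique_project_name_py pn ep sp =
      (match (PySem.List.pyRange 0 ((ep.length : Int) + 2) 1).find?
          (pvFree (pvNames ep) (pvBase pn) sp) with
       | some i => pvCandB (pvBase pn) sp i
       | none => "") := by
  unfold make_unique_project_name_py
  dsimp only
  set names := pvNames ep
  set base := pvBase pn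
  set n := ep.length with hlen
  have h02 : (0 : Int) < (n : Int) + 2 := by positivity
  rw [PySem.List.pyRange_one_cons h02, List.find?_cons]
  have hc0 : pvCandB base sp 0 = base := by simp [pvCandB]
  by_cases hfree : PySem.Str.lower base ∈ names
  · have hp : pvFree names base sp 0 = false := by
      simp [pvFree, PySem.Set.contains, hc0, hfree]
    rw [hp, if_neg (by simp [PySem.Set.contains, hfree]),
        pvLoopA_eq_find names base sp (n + 1) 1 (by omega)]
    have h2 : (1 : Int) + ((n + 1 : Nat) : Int) = (n : Int) + 2 := by push_cast; omega
    rw [h2]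
    norm_num
  · have hp : pvFree names base sp 0 = true := by
      simp [pvFree, PySem.Set.contains, hc0, hfree]
    rw [hp, if_pos (by simp [PySem.Set.contains, hfree])]
    exact hc0.symm

-- decimal digits of a Nat, built most-significant first (Nat.toDigits's value)
def pvDigs (n : Nat) : List Char :=
  if h : n < 10 then [Nat.digitChar n]
  else pvDigs (n / 10) ++ [Nat.digitChar (n % 10)]
decreasing_by exact Nat.div_lt_self (by omega) (by omega)

theorem pvToDigitsCore_eq (f : Nat) : ∀ (n : Nat) (ds : List Char), n < f →
    Nat.toDigitsCore 10 f n ds = pvDigs n ++ ds := by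
  induction f with
  | zero => omega
  | succ f ih =>
    intro n ds hn
    rw [Nat.toDigitsCore]
    by_cases h10 : n < 10
    · have h0 : n / 10 = 0 := by omega
      have hm : n % 10 = n := Nat.mod_eq_of_lt h10
      simp [h0, hm, pvDigs, h10]
    · have hne : ¬ (n / 10 = 0) := by omega
      rw [if_neg hne, ih (n / 10) _ (by omega)]
      conv_rhs => rw [pvDigs]
      rw [dif_neg h10]
      simp

theorem pvToDigits_eq (n : Nat) : Nat.toDigits 10 n = pvDigs n :=
  (pvToDigitsCore_eq (n + 1) n [] (by omega)).trans (by simp)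

theorem pvDigs_facts (n : Nat) :
    pvDigs n ≠ [] ∧ (∀ c ∈ pvDigs n, '0' ≤ c ∧ c ≤ '9') := by
  induction n using pvDigs.induct with
  | case1 n h =>
    rw [pvDigs, dif_pos h]
    refine ⟨by simp, ?_⟩
    intro c hc
    simp at hc
    subst hc
    revert h
    exact (by decide : ∀ k < 10, '0' ≤ Nat.digitChar k ∧ Nat.digitChar k ≤ '9') n
  | case2 n h ih =>
    rw [pvDigs, dif_neg h]
    refine ⟨by simp, ?_⟩
    intro c hc
    rw [List.mem_append] at hc
    rcases hc with hc | hc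
    · exact ih.2 c hc
    · simp at hc
      subst hc
      have hm : n % 10 < 10 := by omega
      revert hm
      exact (by decide : ∀ k < 10, '0' ≤ Nat.digitChar k ∧ Nat.digitChar k ≤ '9') (n % 10)

-- the digit fold on an all-digit list keeps the ok-flag and folds the value
theorem pvFold_digits (m : List Char) (hd : ∀ c ∈ m, '0' ≤ c ∧ c ≤ '9') :
    ∀ (a : Int) (b : Bool),
    m.foldl (fun (acc : Int × Bool) ch =>
      if '0' ≤ ch ∧ ch ≤ '9' then (acc.1 * 10 + (ch.toNat : Int) - 48, acc.2) else (acc.1, false))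
      (a, b)
    = (m.foldl (fun (a : Int) ch => a * 10 + (ch.toNat : Int) - 48) a, b) := by
  induction m with
  | nil => intro a b; rfl
  | cons c m ih =>
    intro a b
    have hc := hd c (by simp)
    simp only [List.foldl_cons, if_pos hc]
    exact ih (fun x hx => hd x (by simp [hx])) _ b

theorem pvDigs_val (n : Nat) :
    ∀ (a : Int),
    (pvDigs n).foldl (fun (a : Int) ch => a * 10 + (ch.toNat : Int) - 48) a
      = a * 10 ^ (pvDigs n).length + n := by
  induction n using pvDigs.induct with
  | case1 n h =>
    intro a
    rw [pvDigs, dif_pos h]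
    have : (Nat.digitChar n).toNat = n + 48 := by
      revert h
      exact (by decide : ∀ k < 10, (Nat.digitChar k).toNat = k + 48) n
    simp [this]
    ring
  | case2 n h ih =>
    intro a
    rw [pvDigs, dif_neg h]
    rw [List.foldl_append, ih a]
    have : (Nat.digitChar (n % 10)).toNat = n % 10 + 48 := by
      have hm : n % 10 < 10 := by omega
      revert hm
      exact (by decide : ∀ k < 10, (Nat.digitChar k).toNat = k + 48) (n % 10)
    simp [this, pow_succ]
    push_cast
    have := Nat.div_add_mod n 10
    ring_nf
    omega

theorem pvDigitsVal_digs (n : Nat) : pvDigitsVal (pvDigs n) = ((n : Int), true) := by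
  unfold pvDigitsVal
  have h1 := pvDigs_facts n
  rw [pvFold_digits _ h1.2, pvDigs_val n 0]
  simp [h1.1]

-- (str i).toList = pvDigs i.toNat for 0 ≤ i
theorem pvToStr_toList (i : Int) (hi : 0 ≤ i) :
    (PySem.Int.toStr i).toList = pvDigs i.toNat := by
  have : PySem.Int.toChars i = pvDigs i.toNat := by
    unfold PySem.Int.toChars
    rw [if_neg (by omega), pvToDigits_eq]
  rw [← this]
  exact PySem.Int.toList_toStr i

-- lowerChar fixes decimal digits
theorem pvLowerChar_digit (c : Char) (h1 : '0' ≤ c) (h2 : c ≤ '9') :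
    PySem.Chars.lowerChar c = c := by
  unfold PySem.Chars.lowerChar PySem.Chars.isupper
  rw [if_neg]
  simp only [Bool.and_eq_true, decide_eq_true_eq, not_and]
  intro hA
  exfalso
  have h2' : c.val.toNat ≤ 57 := Fin.mk_le_mk.mp (Char.le_def.mp h2)
  have hA' : 65 ≤ c.val.toNat := Fin.mk_le_mk.mp (Char.le_def.mp hA)
  omega

-- lower (candidate base sp i) = candidate (lower base) (lower sp) i for 0 ≤ i
theorem pvLower_cand (base sp : String) (i : Int) (hi : 0 ≤ i) :
    PySem.Str.lower (pvCandB base sp i)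
      = pvCandB (PySem.Str.lower base) (PySem.Str.lower sp) i := by
  have hdig : PySem.Chars.lower (PySem.Int.toStr i).toList = (PySem.Int.toStr i).toList := by
    rw [pvToStr_toList i hi]
    unfold PySem.Chars.lower
    apply List.map_congr_left ?_ |>.trans (List.map_id _)
    intro c hc
    exact pvLowerChar_digit c ((pvDigs_facts i.toNat).2 c hc).1 ((pvDigs_facts i.toNat).2 c hc).2
  have hlow : ∀ s : String, (PySem.Str.lower s).toList = List.map PySem.Chars.lowerChar s.toList := by
    intro s
    simp [PySem.Str.toList_lower, PySem.Chars.lower]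
  have hdig' : List.map PySem.Chars.lowerChar (PySem.Int.toStr i).toList = (PySem.Int.toStr i).toList := by
    have := hdig
    unfold PySem.Chars.lower at this
    simpa [PySem.Str.toList_lower] using this
  apply String.toList_inj.mp
  unfold pvCandB
  split
  · rfl
  · have l1 : List.map PySem.Chars.lowerChar " (từ ".toList = " (từ ".toList := by decide
    have l2 : List.map PySem.Chars.lowerChar ")".toList = ")".toList := by decide
    have l3 : List.map PySem.Chars.lowerChar " ".toList = " ".toList := by decide
    split <;> simp only [hlow, String.toList_append, List.map_append, hdig', l1, l2, l3]
  done

theorem pvMexScan_spec (l : List Int) (hp : l.Pairwise (· < ·)) :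
    ∀ (k : Int), (∀ x ∈ l, k ≤ x) →
      k ≤ pvMexScan l k ∧ pvMexScan l k ∉ l ∧
      (∀ j, k ≤ j → j < pvMexScan l k → j ∈ l) := by
  induction l with
  | nil =>
    intro k _
    refine ⟨le_refl _, by simp [pvMexScan], ?_⟩
    intro j h1 h2
    rw [pvMexScan] at h2
    omega
  | cons c rest ih =>
    intro k hge
    rw [List.pairwise_cons] at hp
    by_cases hck : c = k
    · subst hck
      have hrest : ∀ x ∈ rest, c + 1 ≤ x := fun x hx => by have := hp.1 x hx; omega
      obtain ⟨h1, h2, h3⟩ := ih hp.2 (c + 1) hrest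
      rw [pvMexScan, if_neg (by simp)]
      refine ⟨by omega, ?_, ?_⟩
      · simp only [List.mem_cons, not_or]
        exact ⟨by omega, h2⟩
      · intro j hj1 hj2
        by_cases hjc : j = c
        · simp [hjc]
        · exact List.mem_cons_of_mem _ (h3 j (by omega) hj2)
    · rw [pvMexScan, if_pos hck]
      have hck' : k < c := by have := hge c (by simp); omega
      refine ⟨le_refl _, ?_, by intro j h1 h2; omega⟩
      simp only [List.mem_cons, not_or]
      exact ⟨by omega, fun hk => by have := hp.1 k hk; omega⟩

theorem pvMexScan_le (l : List Int) : ∀ k, pvMexScan l k ≤ k + l.length := by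
  induction l with
  | nil => intro k; simp [pvMexScan]
  | cons c rest ih =>
    intro k
    rw [pvMexScan]
    split
    · simp; omega
    · have := ih (k + 1); simp at *; omega

theorem pvUsed_mem (bcf scf : String) (ep : List (String × Option (List (String × String)))) (i : Int) :
    i ∈ pvUsed bcf scf ep ↔ ∃ pr ∈ ep, pvParse bcf scf (pvNorm pr) = some i := by
  unfold pvUsed
  suffices h : ∀ (l : List (String × Option (List (String × String)))) (s : PySem.Set Int),
      i ∈ l.foldl (fun s pr => match pvParse bcf scf (pvNorm pr) with
        | some j => PySem.Set.add s j | none => s) s ↔ i ∈ s ∨ ∃ pr ∈ l, pvParse bcf scf (pvNorm pr) = some i by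
    rw [h]; simp
  intro l
  induction l with
  | nil => simp
  | cons pr rest ih =>
    intro s
    rcases hp : pvParse bcf scf (pvNorm pr) with _ | j
    · simp only [List.foldl_cons, hp]
      rw [ih]
      simp [hp]
    · simp only [List.foldl_cons, hp]
      rw [ih]
      simp only [PySem.Set.mem_add, List.mem_cons]
      constructor
      · rintro (⟨h | rfl⟩ | h)
        · exact Or.inl h
        · exact Or.inr ⟨pr, Or.inl rfl, hp⟩
        · rcases h with ⟨q, hq, hq2⟩
          exact Or.inr ⟨q, Or.inr hq, hq2⟩
      · rintro (h | ⟨q, hq | hq, hq2⟩)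
        · exact Or.inl (Or.inl h)
        · subst hq
          rw [hp] at hq2
          simp at hq2
          exact Or.inl (Or.inr hq2.symm)
        · exact Or.inr ⟨q, hq, hq2⟩

theorem pvUsed_nodup (bcf scf : String) (ep : List (String × Option (List (String × String)))) :
    (pvUsed bcf scf ep).Nodup := by
  unfold pvUsed
  suffices h : ∀ (l : List (String × Option (List (String × String)))) (s : PySem.Set Int), s.Nodup →
      (l.foldl (fun s pr => match pvParse bcf scf (pvNorm pr) with
        | some j => PySem.Set.add s j | none => s) s).Nodup from h ep [] (by simp)
  intro l
  induction l with
  | nil => intro s hs; exact hs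
  | cons pr rest ih =>
    intro s hs
    simp only [List.foldl_cons]
    rcases hp : pvParse bcf scf (pvNorm pr) with _ | j <;> simp only [List.foldl_cons, hp]
    · exact ih s hs
    · exact ih _ (PySem.Set.nodup_add s j hs)

theorem pvUsed_len (bcf scf : String) (ep : List (String × Option (List (String × String)))) :
    (pvUsed bcf scf ep).length ≤ ep.length := by
  unfold pvUsed
  suffices h : ∀ (l : List (String × Option (List (String × String)))) (s : PySem.Set Int),
      (l.foldl (fun s pr => match pvParse bcf scf (pvNorm pr) with
        | some j => PySem.Set.add s j | none => s) s).length ≤ s.length + l.length by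
    have := h ep []; simpa using this
  intro l
  induction l with
  | nil => intro s; simp
  | cons pr rest ih =>
    intro s
    rcases hp : pvParse bcf scf (pvNorm pr) with _ | j <;>
      simp only [List.foldl_cons, List.length_cons, hp]
    · have := ih s; omega
    · have := ih (PySem.Set.add s j)
      have hlen : (PySem.Set.add s j).length ≤ s.length + 1 := by
        rw [PySem.Set.add_eq_ite]
        split <;> simp
      omega

theorem pvParse_nonneg (bcf scf t : String) (i : Int) (h : pvParse bcf scf t = some i) : 0 ≤ i := by
  unfold pvParse at h
  dsimp only at h
  split_ifs at h with h1 h2 h3 h4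
  all_goals first
    | (rw [Option.some_inj] at h; subst h;
       first | omega | exact le_trans (by norm_num) h4.2.1)
    | exact absurd h (by simp)

-- the slice t[len(p):-1] of t = p ++ q ++ [c]
theorem pvSlice_mid (p q : List Char) (c : Char) :
    PySem.List.slice (p ++ q ++ [c]) (some (p.length : Int)) (some (-1)) = q := by
  have hlen : (p ++ q ++ [c]).length = p.length + q.length + 1 := by simp; omega
  have h1 : PySem.List.clampIdx (p ++ q ++ [c]).length ((p.length : Nat) : Int) = p.length := by
    unfold PySem.List.clampIdx
    rw [if_neg (by omega)]
    simp
  have h2 : PySem.List.clampIdx (p ++ q ++ [c]).length (-1) = p.length + q.length := by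
    unfold PySem.List.clampIdx
    rw [if_pos (by norm_num), if_neg (by rw [hlen]; push_cast; omega)]
    rw [hlen]
    omega
  unfold PySem.List.slice
  dsimp only
  rw [h1, h2]
  have h3 : p.length + q.length - p.length = q.length := by omega
  rw [List.append_assoc, List.drop_left, h3, List.take_left]

-- toList forms of the three candidate shapes
theorem pvCand1_toList (b s : String) :
    (pvCandB b s 1).toList = b.toList ++ " (từ ".toList ++ s.toList ++ [')'] := by
  simp [pvCandB, String.toList_append]

theorem pvCand2_toList (b s : String) (i : Int) (h0 : ¬ i = 0) (h1 : ¬ i = 1) :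
    (pvCandB b s i).toList
      = b.toList ++ " (từ ".toList ++ s.toList ++ [' '] ++ (PySem.Int.toStr i).toList ++ [')'] := by
  simp [pvCandB, h0, h1, String.toList_append]

theorem pvToStr_len_pos (i : Int) (hi : 0 ≤ i) : 1 ≤ (PySem.Int.toStr i).toList.length := by
  rw [pvToStr_toList i hi]
  have := (pvDigs_facts i.toNat).1
  cases h : pvDigs i.toNat with
  | nil => exact absurd h this
  | cons a l => simp

-- THE PARSE BIJECTION: parse recognises exactly the casefolded candidates
theorem pvParse_iff (bcf scf t : String) (i : Int) (hi : 0 ≤ i) :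
    pvParse bcf scf t = some i ↔ t = pvCandB bcf scf i := by
  have hL1 : (" (từ " : String).toList.length = 5 := by decide
  have hpre_toList : (bcf ++ " (từ " ++ scf ++ " ").toList
      = bcf.toList ++ " (từ ".toList ++ scf.toList ++ [' '] := by
    simp [String.toList_append]
  have hpre_len : (bcf ++ " (từ " ++ scf ++ " ").toList.length
      = bcf.toList.length + scf.toList.length + 6 := by
    rw [hpre_toList]
    simp [hL1]
    omega
  have hex_len : (bcf ++ " (từ " ++ scf ++ ")").toList.length
      = bcf.toList.length + scf.toList.length + 6 := by
    simp [String.toList_append, hL1]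
    omega
  constructor
  · -- parse t = some i → t is the candidate of counter i
    intro h
    unfold pvParse at h
    dsimp only at h
    split_ifs at h with h1 h2 h3 h4
    · rw [Option.some_inj] at h
      subst h
      simpa [pvCandB] using h1
    · rw [Option.some_inj] at h
      subst h
      simpa [pvCandB] using h2
    · rw [Option.some_inj] at h
      obtain ⟨hok, hv2, hcanon⟩ := h4
      rw [h] at hv2 hcanon
      -- decompose t along the prefix and the final ')'
      rw [PySem.Str.startswith_eq, PySem.Chars.startswith_iff] at h3
      obtain ⟨⟨r0, hr0⟩, hend⟩ := h3
      rw [PySem.Str.endswith_eq, PySem.Chars.endswith_iff] at hend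
      obtain ⟨q0, hq0⟩ := hend
      rcases r0.eq_nil_or_concat with hr0nil | ⟨r', c0, hr'⟩
      · exfalso
        subst hr0nil
        rw [List.append_nil] at hr0
        rw [← hr0, hpre_toList, show ((")" : String).toList = [')']) from rfl] at hq0
        have := List.append_inj' hq0 (by simp)
        simpa using this.2
      · subst hr'
        have ht : t.toList = (bcf ++ " (từ " ++ scf ++ " ").toList ++ r' ++ [c0] := by
          rw [← hr0]
          simp
        rw [show ((")" : String).toList = [')']) from by decide] at hq0
        have hc0 : c0 = ')' := by
          have h5 : q0 ++ [')'] = (bcf ++ " (từ " ++ scf ++ " ").toList ++ r' ++ [c0] := by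
            rw [← ht, ← hq0]
          rw [ht] at hq0
          have h6 := (List.append_inj' h5 rfl).2
          simpa using h6.symm
        subst hc0
        -- the slice is exactly r'
        have hm : (PySem.Str.slice t (some (PySem.Str.len (bcf ++ " (từ " ++ scf ++ " "))) (some (-1))).toList = r' := by
          rw [PySem.Str.toList_slice, PySem.Chars.slice_eq_listSlice, ht]
          exact pvSlice_mid _ r' ')'
        have hms : (PySem.Int.toStr i).toList = r' := by
          rw [hcanon]
          exact hm
        apply String.toList_inj.mp
        rw [pvCand2_toList bcf scf i (by omega) (by omega), ht, hpre_toList, hms]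
  · -- t is the candidate of counter i → parse t = some i
    intro ht
    subst ht
    by_cases hi0 : i = 0
    · subst hi0
      unfold pvParse
      dsimp only
      rw [if_pos (by simp [pvCandB])]
    · by_cases hi1 : i = 1
      · subst hi1
        have hne : ¬ pvCandB bcf scf 1 = bcf := by
          intro he
          have := congrArg (fun u : String => u.toList.length) he
          simp only [pvCand1_toList] at this
          simp at this
        unfold pvParse
        dsimp only
        rw [if_neg hne, if_pos (by simp [pvCandB])]
      · have hi2 : 2 ≤ i := by omega
        have hTL : (pvCandB bcf scf i).toList
            = (bcf ++ " (từ " ++ scf ++ " ").toList ++ (PySem.Int.toStr i).toList ++ [')'] := by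
          rw [pvCand2_toList bcf scf i hi0 hi1, hpre_toList]
        have hslen := pvToStr_len_pos i hi
        have hne0 : ¬ pvCandB bcf scf i = bcf := by
          intro he
          have := congrArg (fun u : String => u.toList.length) he
          simp only [hTL, List.length_append, hpre_len] at this
          omega
        have hne1 : ¬ pvCandB bcf scf i = bcf ++ " (từ " ++ scf ++ ")" := by
          intro he
          have := congrArg (fun u : String => u.toList.length) he
          simp only [hTL, List.length_append, hpre_len, hex_len] at this
          omega
        have hcond : PySem.Str.startswith (pvCandB bcf scf i) (bcf ++ " (từ " ++ scf ++ " ") = true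
            ∧ PySem.Str.endswith (pvCandB bcf scf i) ")" = true := by
          constructor
          · rw [PySem.Str.startswith_eq, PySem.Chars.startswith_iff]
            exact ⟨(PySem.Int.toStr i).toList ++ [')'], by rw [hTL]; simp⟩
          · rw [PySem.Str.endswith_eq, PySem.Chars.endswith_iff]
            refine ⟨(bcf ++ " (từ " ++ scf ++ " ").toList ++ (PySem.Int.toStr i).toList, ?_⟩
            rw [hTL]
            simp
        have hm : (PySem.Str.slice (pvCandB bcf scf i) (some (PySem.Str.len (bcf ++ " (từ " ++ scf ++ " "))) (some (-1))).toList
            = (PySem.Int.toStr i).toList := by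
          rw [PySem.Str.toList_slice, PySem.Chars.slice_eq_listSlice, hTL]
          exact pvSlice_mid _ _ ')'
        have hr : pvDigitsVal (PySem.Str.slice (pvCandB bcf scf i) (some (PySem.Str.len (bcf ++ " (từ " ++ scf ++ " "))) (some (-1))).toList
            = (i, true) := by
          rw [hm, pvToStr_toList i hi, pvDigitsVal_digs, Int.toNat_of_nonneg hi]
        have hms : PySem.Int.toStr i = PySem.Str.slice (pvCandB bcf scf i) (some (PySem.Str.len (bcf ++ " (từ " ++ scf ++ " "))) (some (-1)) :=
          String.toList_inj.mp hm.symm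
        unfold pvParse
        dsimp only
        rw [if_neg hne0, if_neg hne1, if_pos hcond,
            if_pos ⟨by rw [hr], by rw [hr]; exact hi2, by rw [hr]; exact hms⟩, hr]

-- membership of counter j in the parsed set = candidate j's casefolded form being taken
theorem pvKey (ep : List (String × Option (List (String × String)))) (base sp : String) (j : Int) (hj : 0 ≤ j) :
    (PySem.Str.lower (pvCandB base sp j) ∈ pvNames ep)
      ↔ j ∈ pvUsed (PySem.Str.lower base) (PySem.Str.lower sp) ep := by
  rw [pvLower_cand base sp j hj, pvUsed_mem]
  unfold pvNames
  rw [PySem.Set.mem_ofList, List.mem_map]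
  constructor
  · rintro ⟨pr, hpr, hn⟩
    exact ⟨pr, hpr, (pvParse_iff _ _ (pvNorm pr) j hj).mpr hn⟩
  · rintro ⟨pr, hpr, hn⟩
    exact ⟨pr, hpr, (pvParse_iff _ _ (pvNorm pr) j hj).mp hn⟩

-- A's find? over [0, n+2) returns exactly the mex of the parsed counters
theorem pvFind_eq_mex (ep : List (String × Option (List (String × String)))) (base sp : String) :
    (PySem.List.pyRange 0 ((ep.length : Int) + 2) 1).find? (pvFree (pvNames ep) base sp)
      = some (pvMexScan (PySem.List.sorted (pvUsed (PySem.Str.lower base) (PySem.Str.lower sp) ep) (fun x => x) false) 0) := by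
  have hndu := pvUsed_nodup (PySem.Str.lower base) (PySem.Str.lower sp) ep
  have hmemst : ∀ x : Int,
      x ∈ PySem.List.sorted (pvUsed (PySem.Str.lower base) (PySem.Str.lower sp) ep) (fun x => x) false
        ↔ x ∈ pvUsed (PySem.Str.lower base) (PySem.Str.lower sp) ep :=
    fun x => PySem.List.mem_sorted _ _ false x
  have hnn : ∀ x : Int, x ∈ pvUsed (PySem.Str.lower base) (PySem.Str.lower sp) ep → 0 ≤ x := by
    intro x hx
    obtain ⟨pr, _, hp⟩ := (pvUsed_mem _ _ ep x).mp hx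
    exact pvParse_nonneg _ _ _ x hp
  have hpw : (PySem.List.sorted (pvUsed (PySem.Str.lower base) (PySem.Str.lower sp) ep) (fun x => x) false).Pairwise (· < ·) := by
    have hle := PySem.List.sorted_pairwise (pvUsed (PySem.Str.lower base) (PySem.Str.lower sp) ep) (fun x => x)
    have hnd := ((PySem.List.sorted_perm (pvUsed (PySem.Str.lower base) (PySem.Str.lower sp) ep) (fun x => x) false).nodup_iff).mpr hndu
    exact (hle.and hnd).imp (fun {a b} hab => lt_of_le_of_ne hab.1 hab.2)
  obtain ⟨hM0, hMnotin, hMall⟩ := pvMexScan_spec _ hpw 0 (fun x hx => hnn x ((hmemst x).mp hx))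
  have hMle : pvMexScan (PySem.List.sorted (pvUsed (PySem.Str.lower base) (PySem.Str.lower sp) ep) (fun x => x) false) 0
      ≤ (ep.length : Int) := by
    have h1 := pvMexScan_le (PySem.List.sorted (pvUsed (PySem.Str.lower base) (PySem.Str.lower sp) ep) (fun x => x) false) 0
    have h2 := PySem.List.length_sorted (pvUsed (PySem.Str.lower base) (PySem.Str.lower sp) ep) (fun x => x) false
    have h3 := pvUsed_len (PySem.Str.lower base) (PySem.Str.lower sp) ep
    omega
  rw [PySem.List.pyRange_one_append 0
      (pvMexScan (PySem.List.sorted (pvUsed (PySem.Str.lower base) (PySem.Str.lower sp) ep) (fun x => x) false) 0)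
      ((ep.length : Int) + 2) hM0 (by omega)]
  rw [List.find?_append]
  have hnone : (PySem.List.pyRange 0
      (pvMexScan (PySem.List.sorted (pvUsed (PySem.Str.lower base) (PySem.Str.lower sp) ep) (fun x => x) false) 0) 1).find?
        (pvFree (pvNames ep) base sp) = none := by
    rw [List.find?_eq_none]
    intro j hj
    rw [PySem.List.mem_pyRange_one] at hj
    have hju := (hmemst j).mp (hMall j hj.1 hj.2)
    have hjn : PySem.Str.lower (pvCandB base sp j) ∈ pvNames ep := (pvKey ep base sp j hj.1).mpr hju
    simp [pvFree, PySem.Set.contains, hjn]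
  rw [hnone]
  rw [PySem.List.pyRange_one_cons (by omega), List.find?_cons]
  have hMnot : ¬ PySem.Str.lower (pvCandB base sp
      (pvMexScan (PySem.List.sorted (pvUsed (PySem.Str.lower base) (PySem.Str.lower sp) ep) (fun x => x) false) 0)) ∈ pvNames ep :=
    fun hc => hMnotin ((hmemst _).mpr ((pvKey ep base sp _ hM0).mp hc))
  have hMfree : pvFree (pvNames ep) base sp
      (pvMexScan (PySem.List.sorted (pvUsed (PySem.Str.lower base) (PySem.Str.lower sp) ep) (fun x => x) false) 0) = true := by
    simp [pvFree, PySem.Set.contains, hMnot]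
  rw [hMfree]
  rfl

-- A = B: A's first free candidate carries exactly the mex of the parsed counters
theorem pvMain_eq (pn : Option String) (ep : List (String × Option (List (String × String)))) (sp : String) :
    make_unique_project_name_py pn ep sp = make_unique_project_name_py_alt pn ep sp := by
  rw [pvA_eq_find pn ep sp, pvFind_eq_mex ep (pvBase pn) sp]
  rfl

-- ===== VERDICT (by name: the statement is the Claim_ definition above) =====
theorem make_unique_project_name_py_spec : Claim_equal_make_unique_project_name_py := by
  intro pn ep sp _
  unfold Spec_make_unique_project_name_py
  exact pvMain_eq pn ep sp
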